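-- pv_equiv track=rewrite | github.com/posl/comment_recommendation | script/mod_gen/4_time/zh/145_D/6.py | solve
-- ===== SOURCE A (Python) =====
-- def solve(x, y):
--     dp = [[0 for i in range(y+1)] for j in range(x+1)]
--     dp[0][0] = 1
--     for i in range(x+1):
--         for j in range(y+1):
--             if i+1 <= x and j+2 <= y:
--                 dp[i+1][j+2] += dp[i][j]
--                 dp[i+1][j+2] %= 1000000007
--             if i+2 <= x and j+1 <= y:
--                 dp[i+2][j+1] += dp[i][j]
--                 dp[i+2][j+1] %= 1000000007
--     return dp[x][y]
-- ===== SOURCE B (Python) =====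
-- def solve(x, y):
--     # path count: taking the x+1/y+2 step a times and the x+2/y+1 step b times reaches (x,y)
--     # iff a=(2y-x)/3, b=(2x-y)/3 are nonnegative integers; answer C(a+b,a) mod p.
--     p = 1000000007
--     if (x + y) % 3:
--         return 0
--     a = (2 * y - x) // 3
--     b = (2 * x - y) // 3
--     if a < 0 or b < 0:
--         return 0
--     c = 1
--     for i in range(1, a + 1):
--         c = c * (b + i) // i
--     return c % p
-- ===== Notes on version B (the rewrite author's own statement) =====
-- stated objective: faster
-- what changed: Replaced the O(x*y) push-DP table that counts step paths by solving the linear system for the two step counts a=(2y-x)/3, b=(2x-y)/3 and returning the binomial coefficient C(a+b,a) mod 1000000007 computed by one multiplicative loop.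
import Mathlib
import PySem

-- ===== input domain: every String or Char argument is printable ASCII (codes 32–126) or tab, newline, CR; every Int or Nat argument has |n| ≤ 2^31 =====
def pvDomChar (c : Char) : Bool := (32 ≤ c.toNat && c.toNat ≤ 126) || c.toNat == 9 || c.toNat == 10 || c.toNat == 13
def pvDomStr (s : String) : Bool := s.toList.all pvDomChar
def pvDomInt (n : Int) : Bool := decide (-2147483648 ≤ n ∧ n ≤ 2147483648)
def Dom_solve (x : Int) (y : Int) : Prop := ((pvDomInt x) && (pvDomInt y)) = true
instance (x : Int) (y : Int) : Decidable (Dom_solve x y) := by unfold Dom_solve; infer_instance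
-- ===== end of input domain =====

-- B replaces A's O(x*y) DP table by solving for the two step counts and one
-- multiplicative binomial loop (objective: faster; measured asymptotic change).

-- ===== PORT A =====
-- dp[r][c] += v  (two Python statements 'dp[r][c] += v' read row, update, write back)
def pvBump (dp : List (List Int)) (r c : Int) (v : Int) : List (List Int) :=
  PySem.List.pySetD dp r
    (PySem.List.pySetD (PySem.List.pyGetD dp r []) c
      (PySem.List.pyGetD (PySem.List.pyGetD dp r []) c 0 + v))

-- dp[r][c] %= 1000000007
def pvModAt (dp : List (List Int)) (r c : Int) : List (List Int) :=
  PySem.List.pySetD dp r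
    (PySem.List.pySetD (PySem.List.pyGetD dp r []) c
      (PySem.Int.mod (PySem.List.pyGetD (PySem.List.pyGetD dp r []) c 0) 1000000007))

-- the body of the double loop at (i, j)
def pvStepA (x y : Int) (dp : List (List Int)) (i j : Int) : List (List Int) :=
  let dp :=
    if i + 1 ≤ x ∧ j + 2 ≤ y then
      pvModAt (pvBump dp (i+1) (j+2) (PySem.List.pyGetD (PySem.List.pyGetD dp i []) j 0)) (i+1) (j+2)
    else dp
  if i + 2 ≤ x ∧ j + 1 ≤ y then
    pvModAt (pvBump dp (i+2) (j+1) (PySem.List.pyGetD (PySem.List.pyGetD dp i []) j 0)) (i+2) (j+1)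
  else dp

def solve (x : Int) (y : Int) : Int :=
  let dp : List (List Int) :=
    (PySem.List.pyRange 0 (x+1) 1).map (fun _ => (PySem.List.pyRange 0 (y+1) 1).map (fun _ => (0:Int)))
  let dp := PySem.List.pySetD dp 0 (PySem.List.pySetD (PySem.List.pyGetD dp 0 []) 0 1)
  let dp := (PySem.List.pyRange 0 (x+1) 1).foldl
    (fun dp i => (PySem.List.pyRange 0 (y+1) 1).foldl (fun dp j => pvStepA x y dp i j) dp) dp
  PySem.List.pyGetD (PySem.List.pyGetD dp x []) y 0

-- ===== PORT B =====
def solve_alt (x : Int) (y : Int) : Int :=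
  if PySem.Int.mod (x + y) 3 ≠ 0 then 0
  else
    let a := PySem.Int.floordiv (2*y - x) 3
    let b := PySem.Int.floordiv (2*x - y) 3
    if a < 0 ∨ b < 0 then 0
    else
      let c := (PySem.List.pyRange 1 (a+1) 1).foldl
        (fun c i => PySem.Int.floordiv (c * (b + i)) i) 1
      PySem.Int.mod c 1000000007

-- ===== PRECONDITION & SPEC =====
-- Pre_ excludes x < 0 or y < 0, where A raises IndexError (dp[0][0] on an empty/short table).
def Pre_solve (x : Int) (y : Int) : Prop := 0 ≤ x ∧ 0 ≤ y
instance (x : Int) (y : Int) : Decidable (Pre_solve x y) := by unfold Pre_solve; infer_instance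
def pvWitness_solve : Int × Int := (3, 3)

def Spec_solve (x : Int) (y : Int) (out : Int) : Prop := out = solve_alt x y
instance (x : Int) (y : Int) (out : Int) : Decidable (Spec_solve x y out) := by unfold Spec_solve; infer_instance

-- ===== CLAIM (what is proved, stated in full; the proofs are below) =====
def Claim_equal_solve : Prop := ∀ (x : Int) (y : Int), Dom_solve x y → Pre_solve x y → Spec_solve x y (solve x y)
-- ===== LEMMAS AND PROOFS =====

/- Model of A: the loop pushes dp[i][j] into cells (i+1,j+2) and (i+2,j+1); processed cells are
   final, so the final table satisfies the pull recurrence pvG. -/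
def pvG (a b : Nat) : Int :=
  ((if a = 0 ∧ b = 0 then (1:Int) else 0) +
   (if _h1 : 1 ≤ a ∧ 2 ≤ b then pvG (a-1) (b-2) else 0) +
   (if _h2 : 2 ≤ a ∧ 1 ≤ b then pvG (a-2) (b-1) else 0)) % 1000000007
termination_by a + b
decreasing_by all_goals omega

lemma pvG_eq (a b : Nat) : pvG a b =
    ((if a = 0 ∧ b = 0 then (1:Int) else 0) +
     (if 1 ≤ a ∧ 2 ≤ b then pvG (a-1) (b-2) else 0) +
     (if 2 ≤ a ∧ 1 ≤ b then pvG (a-2) (b-1) else 0)) % 1000000007 := by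
  rw [pvG]; simp only [dite_eq_ite]

-- value of cell (a,b)
def pvVal (dp : List (List Int)) (a b : Nat) : Int := (dp.getD a []).getD b 0

-- model value of cell (a,b) at loop position (i,j) (cell (i,j) about to be processed)
def pvEnt (i j a b : Nat) : Int :=
  ((if a = 0 ∧ b = 0 then (1:Int) else 0) +
   (if 1 ≤ a ∧ 2 ≤ b ∧ (a - 1 < i ∨ (a - 1 = i ∧ b - 2 < j)) then pvG (a-1) (b-2) else 0) +
   (if 2 ≤ a ∧ 1 ≤ b ∧ (a - 2 < i ∨ (a - 2 = i ∧ b - 1 < j)) then pvG (a-2) (b-1) else 0)) % 1000000007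

def pvInv (x y i j : Nat) (dp : List (List Int)) : Prop :=
  dp.length = x + 1 ∧ (∀ r ∈ dp, r.length = y + 1) ∧
  ∀ a b, a ≤ x → b ≤ y → pvVal dp a b = pvEnt i j a b

lemma pvEnt_processed (i j a b : Nat) (h : a < i ∨ (a = i ∧ b < j)) :
    pvEnt i j a b = pvG a b := by
  have h1 : (1 ≤ a ∧ 2 ≤ b ∧ (a - 1 < i ∨ (a - 1 = i ∧ b - 2 < j))) ↔ (1 ≤ a ∧ 2 ≤ b) := by omega
  have h2 : (2 ≤ a ∧ 1 ≤ b ∧ (a - 2 < i ∨ (a - 2 = i ∧ b - 1 < j))) ↔ (2 ≤ a ∧ 1 ≤ b) := by omega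
  rw [pvEnt]
  conv_rhs => rw [pvG_eq a b]
  simp only [h1, h2]

lemma pvVal_write (dp : List (List Int)) (r c : Nat) (v : Int)
    (hr : r < dp.length) (hc : c < (dp.getD r []).length) (a b : Nat) :
    pvVal (dp.set r ((dp.getD r []).set c v)) a b = if a = r ∧ b = c then v else pvVal dp a b := by
  have hc' : c < (dp[r]?.getD []).length := by
    simpa [List.getD_eq_getElem?_getD] using hc
  unfold pvVal
  simp only [List.getD_eq_getElem?_getD, List.getElem?_set]
  by_cases ha : r = a
  · subst ha
    rw [if_pos rfl, if_pos hr]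
    simp only [Option.getD_some, List.getElem?_set]
    by_cases hb : c = b
    · subst hb
      rw [if_pos rfl, if_pos hc']
      simp
    · rw [if_neg hb, if_neg (fun h => hb (h.2).symm)]
  · rw [if_neg ha]
    rw [if_neg (fun h => ha h.1.symm)]

-- the Python statements 'dp[r][c] += v; dp[r][c] %= 1000000007' in model form
lemma pvBumpMod_eq (dp : List (List Int)) (r c : Nat) (v : Int)
    (hr : r < dp.length) (hc : c < (dp.getD r []).length) :
    pvModAt (pvBump dp (r:Int) (c:Int) v) (r:Int) (c:Int)
      = dp.set r ((dp.getD r []).set c ((pvVal dp r c + v) % 1000000007)) := by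
  have hc' : c < (dp[r]?.getD []).length := by
    simpa [List.getD_eq_getElem?_getD] using hc
  unfold pvBump pvModAt pvVal
  simp only [PySem.List.pySetD_natCast, PySem.List.pyGetD_natCast]
  have hget : (dp.set r ((dp.getD r []).set c ((dp.getD r []).getD c 0 + v))).getD r []
      = (dp.getD r []).set c ((dp.getD r []).getD c 0 + v) := by
    simp [List.getD_eq_getElem?_getD, hr]
  rw [hget]
  have hgc : ((dp.getD r []).set c ((dp.getD r []).getD c 0 + v)).getD c 0
      = (dp.getD r []).getD c 0 + v := by
    simp [List.getD_eq_getElem?_getD, hc']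
  rw [hgc, List.set_set, List.set_set, PySem.Int.mod_eq_emod_of_pos (by norm_num)]

lemma pvEnt_cur (i j : Nat) : pvEnt i j i j = pvG i j := by
  have h1 : (1 ≤ i ∧ 2 ≤ j ∧ (i - 1 < i ∨ (i - 1 = i ∧ j - 2 < j))) ↔ (1 ≤ i ∧ 2 ≤ j) := by omega
  have h2 : (2 ≤ i ∧ 1 ≤ j ∧ (i - 2 < i ∨ (i - 2 = i ∧ j - 1 < j))) ↔ (2 ≤ i ∧ 1 ≤ j) := by omega
  rw [pvEnt]
  conv_rhs => rw [pvG_eq i j]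
  simp only [h1, h2]

lemma pvEnt_stepA (i j : Nat) :
    pvEnt i (j+1) (i+1) (j+2) = (pvEnt i j (i+1) (j+2) + pvG i j) % 1000000007 := by
  rw [pvEnt, pvEnt]
  rw [if_neg (show ¬(i + 1 = 0 ∧ j + 2 = 0) by omega)]
  rw [if_pos (show 1 ≤ i+1 ∧ 2 ≤ j+2 ∧ (i + 1 - 1 < i ∨ (i + 1 - 1 = i ∧ j + 2 - 2 < j + 1)) by omega)]
  rw [if_neg (show ¬(1 ≤ i+1 ∧ 2 ≤ j+2 ∧ (i + 1 - 1 < i ∨ (i + 1 - 1 = i ∧ j + 2 - 2 < j))) by omega)]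
  rw [show i + 1 - 1 = i by omega, show j + 2 - 2 = j by omega]
  by_cases hi1 : 1 ≤ i
  · rw [if_pos (show 2 ≤ i+1 ∧ 1 ≤ j+2 ∧ (i + 1 - 2 < i ∨ (i + 1 - 2 = i ∧ j + 2 - 1 < j + 1)) by omega),
        if_pos (show 2 ≤ i+1 ∧ 1 ≤ j+2 ∧ (i + 1 - 2 < i ∨ (i + 1 - 2 = i ∧ j + 2 - 1 < j)) by omega)]
    rw [Int.emod_add_emod]
    congr 1; ring
  · rw [if_neg (show ¬(2 ≤ i+1 ∧ 1 ≤ j+2 ∧ (i + 1 - 2 < i ∨ (i + 1 - 2 = i ∧ j + 2 - 1 < j + 1))) by omega),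
        if_neg (show ¬(2 ≤ i+1 ∧ 1 ≤ j+2 ∧ (i + 1 - 2 < i ∨ (i + 1 - 2 = i ∧ j + 2 - 1 < j))) by omega)]
    rw [Int.emod_add_emod]
    congr 1; ring

lemma pvEnt_stepB (i j : Nat) :
    pvEnt i (j+1) (i+2) (j+1) = (pvEnt i j (i+2) (j+1) + pvG i j) % 1000000007 := by
  rw [pvEnt, pvEnt]
  rw [if_neg (show ¬(i + 2 = 0 ∧ j + 1 = 0) by omega)]
  rw [if_neg (show ¬(1 ≤ i+2 ∧ 2 ≤ j+1 ∧ (i + 2 - 1 < i ∨ (i + 2 - 1 = i ∧ j + 1 - 2 < j + 1))) by omega)]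
  rw [if_neg (show ¬(1 ≤ i+2 ∧ 2 ≤ j+1 ∧ (i + 2 - 1 < i ∨ (i + 2 - 1 = i ∧ j + 1 - 2 < j))) by omega)]
  rw [if_pos (show 2 ≤ i+2 ∧ 1 ≤ j+1 ∧ (i + 2 - 2 < i ∨ (i + 2 - 2 = i ∧ j + 1 - 1 < j + 1)) by omega)]
  rw [if_neg (show ¬(2 ≤ i+2 ∧ 1 ≤ j+1 ∧ (i + 2 - 2 < i ∨ (i + 2 - 2 = i ∧ j + 1 - 1 < j))) by omega)]
  rw [show i + 2 - 2 = i by omega, show j + 1 - 1 = j by omega]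
  rw [Int.emod_add_emod]
  norm_num

lemma pvEnt_stepC (i j a b : Nat) (hA : ¬(a = i+1 ∧ b = j+2)) (hB : ¬(a = i+2 ∧ b = j+1)) :
    pvEnt i (j+1) a b = pvEnt i j a b := by
  have h1 : (1 ≤ a ∧ 2 ≤ b ∧ (a - 1 < i ∨ (a - 1 = i ∧ b - 2 < j + 1)))
      ↔ (1 ≤ a ∧ 2 ≤ b ∧ (a - 1 < i ∨ (a - 1 = i ∧ b - 2 < j))) := by omega
  have h2 : (2 ≤ a ∧ 1 ≤ b ∧ (a - 2 < i ∨ (a - 2 = i ∧ b - 1 < j + 1)))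
      ↔ (2 ≤ a ∧ 1 ≤ b ∧ (a - 2 < i ∨ (a - 2 = i ∧ b - 1 < j))) := by omega
  rw [pvEnt, pvEnt]
  simp only [h1, h2]

lemma pvRowLen (x y a : Nat) (dp : List (List Int)) (hlen : dp.length = x+1)
    (hrows : ∀ t ∈ dp, t.length = y+1) (ha : a ≤ x) : (dp.getD a []).length = y + 1 := by
  have halt : a < dp.length := by omega
  rw [List.getD_eq_getElem _ _ halt]
  exact hrows _ (List.getElem_mem halt)

lemma pvCondWrite (x y r c : Nat) (dp : List (List Int)) (w : Int)
    (hlen : dp.length = x+1) (hrows : ∀ t ∈ dp, t.length = y+1) (hr : r ≤ x) (hc : c ≤ y) :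
    (dp.set r ((dp.getD r []).set c w)).length = x+1 ∧
    (∀ t ∈ dp.set r ((dp.getD r []).set c w), t.length = y+1) ∧
    (∀ a b, a ≤ x → b ≤ y → pvVal (dp.set r ((dp.getD r []).set c w)) a b
        = if a = r ∧ b = c then w else pvVal dp a b) := by
  have hrl := pvRowLen x y r dp hlen hrows hr
  refine ⟨by simp [hlen], ?_, ?_⟩
  · intro t ht
    rcases List.mem_or_eq_of_mem_set ht with h' | h'
    · exact hrows _ h'
    · rw [h', List.length_set, hrl]
  · intro a b _ _
    exact pvVal_write dp r c w (by omega) (by omega) a b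

lemma pvStep_inv (x y i j : Nat) (dp : List (List Int)) (hi : i ≤ x) (hj : j ≤ y)
    (h : pvInv x y i j dp) :
    pvInv x y i (j+1) (pvStepA (x:Int) (y:Int) dp (i:Int) (j:Int)) := by
  obtain ⟨hlen, hrows, hval⟩ := h
  have hvdp : pvVal dp i j = pvG i j := by rw [hval i j hi hj, pvEnt_cur]
  -- the final invariant from a unified description of the written table
  have main : ∀ dpF : List (List Int), dpF.length = x+1 → (∀ t ∈ dpF, t.length = y+1) →
      (∀ a b, a ≤ x → b ≤ y → pvVal dpF a b =
        if a = i+2 ∧ b = j+1 ∧ i+2 ≤ x ∧ j+1 ≤ y then (pvEnt i j a b + pvG i j) % 1000000007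
        else if a = i+1 ∧ b = j+2 ∧ i+1 ≤ x ∧ j+2 ≤ y then (pvEnt i j a b + pvG i j) % 1000000007
        else pvEnt i j a b) →
      pvInv x y i (j+1) dpF := by
    intro dpF hl hr hdesc
    refine ⟨hl, hr, ?_⟩
    intro a b ha hb
    rw [hdesc a b ha hb]
    by_cases c2 : a = i+2 ∧ b = j+1 ∧ i+2 ≤ x ∧ j+1 ≤ y
    · rw [if_pos c2]
      obtain ⟨rfl, rfl, -, -⟩ := c2
      rw [pvEnt_stepB]
    · rw [if_neg c2]
      by_cases c1 : a = i+1 ∧ b = j+2 ∧ i+1 ≤ x ∧ j+2 ≤ y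
      · rw [if_pos c1]
        obtain ⟨rfl, rfl, -, -⟩ := c1
        rw [pvEnt_stepA]
      · rw [if_neg c1]
        exact (pvEnt_stepC i j a b (by omega) (by omega)).symm
  simp only [pvStepA]
  rw [show ((i:Int) + 1) = ((i+1 : Nat) : Int) by push_cast; ring,
      show ((j:Int) + 2) = ((j+2 : Nat) : Int) by push_cast; ring,
      show ((i:Int) + 2) = ((i+2 : Nat) : Int) by push_cast; ring,
      show ((j:Int) + 1) = ((j+1 : Nat) : Int) by push_cast; ring]
  by_cases hg1 : i + 1 ≤ x ∧ j + 2 ≤ y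
  · rw [if_pos (show ((i+1:Nat):Int) ≤ (x:Int) ∧ ((j+2:Nat):Int) ≤ (y:Int) from
        ⟨by exact_mod_cast hg1.1, by exact_mod_cast hg1.2⟩)]
    rw [pvBumpMod_eq dp (i+1) (j+2) _ (by omega)
        (by rw [pvRowLen x y (i+1) dp hlen hrows (by omega)]; omega)]
    have hread : PySem.List.pyGetD (PySem.List.pyGetD dp (i:Int) []) (j:Int) 0 = pvG i j := by
      simp only [PySem.List.pyGetD_natCast]
      exact hvdp
    rw [hread, hval (i+1) (j+2) (by omega) (by omega)]
    obtain ⟨hl1, hr1, hv1⟩ := pvCondWrite x y (i+1) (j+2) dp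
      ((pvEnt i j (i+1) (j+2) + pvG i j) % 1000000007) hlen hrows (by omega) (by omega)
    set dp1 := dp.set (i+1) ((dp.getD (i+1) []).set (j+2)
      ((pvEnt i j (i+1) (j+2) + pvG i j) % 1000000007)) with hdp1
    have hvdp1 : pvVal dp1 i j = pvG i j := by
      rw [hv1 i j hi hj, if_neg (by omega), hvdp]
    by_cases hg2 : i + 2 ≤ x ∧ j + 1 ≤ y
    · rw [if_pos (show ((i+2:Nat):Int) ≤ (x:Int) ∧ ((j+1:Nat):Int) ≤ (y:Int) from
          ⟨by exact_mod_cast hg2.1, by exact_mod_cast hg2.2⟩)]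
      rw [pvBumpMod_eq dp1 (i+2) (j+1) _ (by omega)
          (by rw [pvRowLen x y (i+2) dp1 hl1 hr1 (by omega)]; omega)]
      have hread1 : PySem.List.pyGetD (PySem.List.pyGetD dp1 (i:Int) []) (j:Int) 0 = pvG i j := by
        simp only [PySem.List.pyGetD_natCast]
        exact hvdp1
      rw [hread1]
      have hv12 : pvVal dp1 (i+2) (j+1) = pvEnt i j (i+2) (j+1) := by
        rw [hv1 (i+2) (j+1) (by omega) (by omega), if_neg (by omega)]
        exact hval _ _ (by omega) (by omega)
      rw [hv12]
      obtain ⟨hl2, hr2, hv2⟩ := pvCondWrite x y (i+2) (j+1) dp1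
        ((pvEnt i j (i+2) (j+1) + pvG i j) % 1000000007) hl1 hr1 (by omega) (by omega)
      refine main _ hl2 hr2 ?_
      intro a b ha hb
      rw [hv2 a b ha hb]
      by_cases c2 : a = i+2 ∧ b = j+1
      · rw [if_pos c2,
            if_pos (show a = i+2 ∧ b = j+1 ∧ i+2 ≤ x ∧ j+1 ≤ y from ⟨c2.1, c2.2, hg2.1, hg2.2⟩)]
        obtain ⟨rfl, rfl⟩ := c2
        rfl
      · rw [if_neg c2,
            if_neg (show ¬(a = i+2 ∧ b = j+1 ∧ i+2 ≤ x ∧ j+1 ≤ y) by omega),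
            hv1 a b ha hb]
        by_cases c1 : a = i+1 ∧ b = j+2
        · rw [if_pos c1,
              if_pos (show a = i+1 ∧ b = j+2 ∧ i+1 ≤ x ∧ j+2 ≤ y from ⟨c1.1, c1.2, hg1.1, hg1.2⟩)]
          obtain ⟨rfl, rfl⟩ := c1
          rfl
        · rw [if_neg c1,
              if_neg (show ¬(a = i+1 ∧ b = j+2 ∧ i+1 ≤ x ∧ j+2 ≤ y) by omega),
              hval a b ha hb]
    · rw [if_neg (show ¬(((i+2:Nat):Int) ≤ (x:Int) ∧ ((j+1:Nat):Int) ≤ (y:Int)) from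
          fun hh => hg2 ⟨by exact_mod_cast hh.1, by exact_mod_cast hh.2⟩)]
      refine main _ hl1 hr1 ?_
      intro a b ha hb
      rw [hv1 a b ha hb,
          if_neg (show ¬(a = i+2 ∧ b = j+1 ∧ i+2 ≤ x ∧ j+1 ≤ y) by omega)]
      by_cases c1 : a = i+1 ∧ b = j+2
      · rw [if_pos c1,
            if_pos (show a = i+1 ∧ b = j+2 ∧ i+1 ≤ x ∧ j+2 ≤ y from ⟨c1.1, c1.2, hg1.1, hg1.2⟩)]
        obtain ⟨rfl, rfl⟩ := c1
        rfl
      · rw [if_neg c1,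
            if_neg (show ¬(a = i+1 ∧ b = j+2 ∧ i+1 ≤ x ∧ j+2 ≤ y) by omega),
            hval a b ha hb]
  · rw [if_neg (show ¬(((i+1:Nat):Int) ≤ (x:Int) ∧ ((j+2:Nat):Int) ≤ (y:Int)) from
        fun hh => hg1 ⟨by exact_mod_cast hh.1, by exact_mod_cast hh.2⟩)]
    by_cases hg2 : i + 2 ≤ x ∧ j + 1 ≤ y
    · rw [if_pos (show ((i+2:Nat):Int) ≤ (x:Int) ∧ ((j+1:Nat):Int) ≤ (y:Int) from
          ⟨by exact_mod_cast hg2.1, by exact_mod_cast hg2.2⟩)]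
      rw [pvBumpMod_eq dp (i+2) (j+1) _ (by omega)
          (by rw [pvRowLen x y (i+2) dp hlen hrows (by omega)]; omega)]
      have hread : PySem.List.pyGetD (PySem.List.pyGetD dp (i:Int) []) (j:Int) 0 = pvG i j := by
        simp only [PySem.List.pyGetD_natCast]
        exact hvdp
      rw [hread, hval (i+2) (j+1) (by omega) (by omega)]
      obtain ⟨hl2, hr2, hv2⟩ := pvCondWrite x y (i+2) (j+1) dp
        ((pvEnt i j (i+2) (j+1) + pvG i j) % 1000000007) hlen hrows (by omega) (by omega)
      refine main _ hl2 hr2 ?_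
      intro a b ha hb
      rw [hv2 a b ha hb]
      by_cases c2 : a = i+2 ∧ b = j+1
      · rw [if_pos c2,
            if_pos (show a = i+2 ∧ b = j+1 ∧ i+2 ≤ x ∧ j+1 ≤ y from ⟨c2.1, c2.2, hg2.1, hg2.2⟩)]
        obtain ⟨rfl, rfl⟩ := c2
        rfl
      · rw [if_neg c2,
            if_neg (show ¬(a = i+2 ∧ b = j+1 ∧ i+2 ≤ x ∧ j+1 ≤ y) by omega),
            if_neg (show ¬(a = i+1 ∧ b = j+2 ∧ i+1 ≤ x ∧ j+2 ≤ y) by omega),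
            hval a b ha hb]
    · rw [if_neg (show ¬(((i+2:Nat):Int) ≤ (x:Int) ∧ ((j+1:Nat):Int) ≤ (y:Int)) from
          fun hh => hg2 ⟨by exact_mod_cast hh.1, by exact_mod_cast hh.2⟩)]
      refine main _ hlen hrows ?_
      intro a b ha hb
      rw [hval a b ha hb,
          if_neg (show ¬(a = i+2 ∧ b = j+1 ∧ i+2 ≤ x ∧ j+1 ≤ y) by omega),
          if_neg (show ¬(a = i+1 ∧ b = j+2 ∧ i+1 ≤ x ∧ j+2 ≤ y) by omega)]

lemma pvRow_shift (x y i : Nat) (dp : List (List Int))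
    (h : pvInv x y i (y+1) dp) : pvInv x y (i+1) 0 dp := by
  obtain ⟨hl, hr, hv⟩ := h
  refine ⟨hl, hr, ?_⟩
  intro a b ha hb
  rw [hv a b ha hb]
  have h1 : (1 ≤ a ∧ 2 ≤ b ∧ (a - 1 < i ∨ (a - 1 = i ∧ b - 2 < y + 1)))
      ↔ (1 ≤ a ∧ 2 ≤ b ∧ (a - 1 < i + 1 ∨ (a - 1 = i + 1 ∧ b - 2 < 0))) := by omega
  have h2 : (2 ≤ a ∧ 1 ≤ b ∧ (a - 2 < i ∨ (a - 2 = i ∧ b - 1 < y + 1)))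
      ↔ (2 ≤ a ∧ 1 ≤ b ∧ (a - 2 < i + 1 ∨ (a - 2 = i + 1 ∧ b - 1 < 0))) := by omega
  rw [pvEnt, pvEnt]
  simp only [h1, h2]

lemma pvInner_loop (x y i : Nat) (hi : i ≤ x) :
    ∀ (J : Nat) (dp : List (List Int)), J ≤ y + 1 → pvInv x y i 0 dp →
    pvInv x y i J ((PySem.List.pyRange 0 ((J:Nat):Int) 1).foldl
      (fun dp j => pvStepA (x:Int) (y:Int) dp (i:Int) j) dp) := by
  intro J
  induction J with
  | zero =>
    intro dp _ h0
    simpa [PySem.List.pyRange_one_eq_nil (by norm_num : (((0:Nat):Int)) ≤ 0)] using h0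
  | succ J ih =>
    intro dp hJ h0
    rw [show (((J+1:Nat)):Int) = ((J:Nat):Int) + 1 by push_cast; ring,
        PySem.List.pyRange_one_succ_right (Int.natCast_nonneg J), List.foldl_append]
    simp only [List.foldl_cons, List.foldl_nil]
    exact pvStep_inv x y i J _ hi (by omega) (ih dp (by omega) h0)

lemma pvOuter_loop (x y : Nat) :
    ∀ (I : Nat) (dp : List (List Int)), I ≤ x + 1 → pvInv x y 0 0 dp →
    pvInv x y I 0 ((PySem.List.pyRange 0 ((I:Nat):Int) 1).foldl
      (fun dp i => (PySem.List.pyRange 0 (((y+1:Nat)):Int) 1).foldl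
        (fun dp j => pvStepA (x:Int) (y:Int) dp i j) dp) dp) := by
  intro I
  induction I with
  | zero =>
    intro dp _ h0
    simpa [PySem.List.pyRange_one_eq_nil (by norm_num : (((0:Nat):Int)) ≤ 0)] using h0
  | succ I ih =>
    intro dp hI h0
    rw [show (((I+1:Nat)):Int) = ((I:Nat):Int) + 1 by push_cast; ring,
        PySem.List.pyRange_one_succ_right (Int.natCast_nonneg I), List.foldl_append]
    simp only [List.foldl_cons, List.foldl_nil]
    exact pvRow_shift x y I _
      (pvInner_loop x y I (by omega) (y+1) _ (le_refl _) (ih dp (by omega) h0))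

lemma pvSolve_eq_g (x y : Nat) : solve (x:Int) (y:Int) = pvG x y := by
  simp only [solve]
  rw [show ((x:Int) + 1) = ((x+1 : Nat) : Int) by push_cast; ring,
      show ((y:Int) + 1) = ((y+1 : Nat) : Int) by push_cast; ring]
  have hrow : ((PySem.List.pyRange 0 (((y+1:Nat)):Int) 1).map (fun _ => (0:Int)))
      = List.replicate (y+1) (0:Int) := by
    rw [List.map_const', PySem.List.length_pyRange_one]
    norm_num
  have hdp0 : ((PySem.List.pyRange 0 (((x+1:Nat)):Int) 1).map
        (fun _ => (PySem.List.pyRange 0 (((y+1:Nat)):Int) 1).map (fun _ => (0:Int))))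
      = List.replicate (x+1) (List.replicate (y+1) (0:Int)) := by
    rw [hrow, List.map_const', PySem.List.length_pyRange_one]
    norm_num
  rw [hdp0]
  rw [PySem.List.pyGetD_zero, show PySem.List.pySetD (List.replicate (x+1) (List.replicate (y+1) (0:Int))) 0
        (PySem.List.pySetD ((List.replicate (x+1) (List.replicate (y+1) (0:Int))).getD 0 []) 0 1)
      = (List.replicate (x+1) (List.replicate (y+1) (0:Int))).set 0
        (((List.replicate (x+1) (List.replicate (y+1) (0:Int))).getD 0 []).set 0 1)
      by simp [PySem.List.pySetD_of_nonneg]]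
  set dp0 := List.replicate (x+1) (List.replicate (y+1) (0:Int)) with hdp0def
  set dp1 := dp0.set 0 ((dp0.getD 0 []).set 0 1) with hdp1def
  have hl0 : dp0.length = x + 1 := by simp [hdp0def]
  have hg0 : dp0.getD 0 [] = List.replicate (y+1) (0:Int) := by
    rw [hdp0def, List.getD_eq_getElem _ _ (by simp), List.getElem_replicate]
  have hinv1 : pvInv x y 0 0 dp1 := by
    refine ⟨by simp [hdp1def, hl0], ?_, ?_⟩
    · intro t ht
      rcases List.mem_or_eq_of_mem_set ht with h' | h'
      · rw [hdp0def] at h'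
        rw [List.eq_of_mem_replicate h']
        simp
      · rw [h', hg0]
        simp
    · intro a b ha hb
      have hw := pvVal_write dp0 0 0 1 (by omega) (by rw [hg0]; simp) a b
      rw [hw]
      have hdp0v : pvVal dp0 a b = 0 := by
        unfold pvVal
        rw [hdp0def, List.getD_replicate _ (by omega), List.getD_replicate _ (by omega)]
      rw [pvEnt,
          if_neg (show ¬(1 ≤ a ∧ 2 ≤ b ∧ (a - 1 < 0 ∨ (a - 1 = 0 ∧ b - 2 < 0))) by omega),
          if_neg (show ¬(2 ≤ a ∧ 1 ≤ b ∧ (a - 2 < 0 ∨ (a - 2 = 0 ∧ b - 1 < 0))) by omega)]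
      by_cases hab : a = 0 ∧ b = 0
      · rw [if_pos hab, if_pos hab]
        obtain ⟨rfl, rfl⟩ := hab
        norm_num
      · rw [if_neg hab, if_neg hab, hdp0v]
        norm_num
  have hfin := pvOuter_loop x y (x+1) dp1 (le_refl _) hinv1
  obtain ⟨-, -, hv⟩ := hfin
  simp only [PySem.List.pyGetD_natCast]
  have := hv x y (le_refl _) (le_refl _)
  unfold pvVal at this
  rw [this, pvEnt_processed _ _ _ _ (by omega)]

-- closed form of pvG: binomial coefficient of the step counts, mod p
def pvCf (a b : Nat) : Int :=
  if (a + b) % 3 = 0 ∧ a ≤ 2*b ∧ b ≤ 2*a then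
    ((Nat.choose ((a+b)/3) ((2*b-a)/3) : Nat) : Int) % 1000000007
  else 0

lemma pvG_eq_cf : ∀ n a b, a + b = n → pvG a b = pvCf a b := by
  intro n
  induction n using Nat.strong_induction_on with
  | _ n ih =>
    intro a b hn
    rw [pvG_eq]
    by_cases hs : (a + b) % 3 = 0 ∧ a ≤ 2*b ∧ b ≤ 2*a
    · -- solvable: a = s + 2t, b = 2s + t
      rw [pvCf, if_pos hs]
      obtain ⟨s, t, rfl, rfl⟩ :
          ∃ s t, a = s + 2*t ∧ b = 2*s + t :=
        ⟨(2*b - a)/3, (2*a - b)/3, by omega, by omega⟩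
      match s, t with
      | 0, 0 =>
        norm_num
      | 0, t'+1 =>
        rw [if_neg (show ¬(0 + 2*(t'+1) = 0 ∧ 2*0 + (t'+1) = 0) by omega)]
        have hT1 : (if 1 ≤ 0 + 2*(t'+1) ∧ 2 ≤ 2*0 + (t'+1) then
            pvG (0 + 2*(t'+1) - 1) (2*0 + (t'+1) - 2) else 0) = 0 := by
          by_cases g1 : 1 ≤ 0 + 2*(t'+1) ∧ 2 ≤ 2*0 + (t'+1)
          · rw [if_pos g1, ih _ (by omega) _ _ rfl, pvCf, if_neg (by omega)]
          · rw [if_neg g1]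
        rw [hT1, if_pos (show 2 ≤ 0 + 2*(t'+1) ∧ 1 ≤ 2*0 + (t'+1) by omega),
            ih _ (by omega) _ _ rfl, pvCf, if_pos (by omega)]
        rw [show (0 + 2*(t'+1) - 2 + (2*0 + (t'+1) - 1))/3 = t' by omega,
            show (2*(2*0 + (t'+1) - 1) - (0 + 2*(t'+1) - 2))/3 = 0 by omega,
            show (0 + 2*(t'+1) + (2*0 + (t'+1)))/3 = t' + 1 by omega,
            show (2*(2*0 + (t'+1)) - (0 + 2*(t'+1)))/3 = 0 by omega]
        norm_num
      | s'+1, 0 =>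
        rw [if_neg (show ¬(s'+1 + 2*0 = 0 ∧ 2*(s'+1) + 0 = 0) by omega)]
        have hT2 : (if 2 ≤ s'+1 + 2*0 ∧ 1 ≤ 2*(s'+1) + 0 then
            pvG (s'+1 + 2*0 - 2) (2*(s'+1) + 0 - 1) else 0) = 0 := by
          by_cases g2 : 2 ≤ s'+1 + 2*0 ∧ 1 ≤ 2*(s'+1) + 0
          · rw [if_pos g2, ih _ (by omega) _ _ rfl, pvCf, if_neg (by omega)]
          · rw [if_neg g2]
        rw [hT2, if_pos (show 1 ≤ s'+1 + 2*0 ∧ 2 ≤ 2*(s'+1) + 0 by omega),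
            ih _ (by omega) _ _ rfl, pvCf, if_pos (by omega)]
        rw [show (s'+1 + 2*0 - 1 + (2*(s'+1) + 0 - 2))/3 = s' by omega,
            show (2*(2*(s'+1) + 0 - 2) - (s'+1 + 2*0 - 1))/3 = s' by omega,
            show (s'+1 + 2*0 + (2*(s'+1) + 0))/3 = s' + 1 by omega,
            show (2*(2*(s'+1) + 0) - (s'+1 + 2*0))/3 = s' + 1 by omega]
        rw [Nat.choose_self, Nat.choose_self]
        norm_num
      | s'+1, t'+1 =>
        rw [if_neg (show ¬(s'+1 + 2*(t'+1) = 0 ∧ 2*(s'+1) + (t'+1) = 0) by omega)]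
        rw [if_pos (show 1 ≤ s'+1 + 2*(t'+1) ∧ 2 ≤ 2*(s'+1) + (t'+1) by omega),
            if_pos (show 2 ≤ s'+1 + 2*(t'+1) ∧ 1 ≤ 2*(s'+1) + (t'+1) by omega),
            ih _ (by omega) _ _ rfl, ih _ (by omega) _ _ rfl, pvCf, pvCf,
            if_pos (by omega), if_pos (by omega)]
        rw [show (s'+1 + 2*(t'+1) - 1 + (2*(s'+1) + (t'+1) - 2))/3 = s' + t' + 1 by omega,
            show (2*(2*(s'+1) + (t'+1) - 2) - (s'+1 + 2*(t'+1) - 1))/3 = s' by omega,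
            show (s'+1 + 2*(t'+1) - 2 + (2*(s'+1) + (t'+1) - 1))/3 = s' + t' + 1 by omega,
            show (2*(2*(s'+1) + (t'+1) - 1) - (s'+1 + 2*(t'+1) - 2))/3 = s' + 1 by omega,
            show (s'+1 + 2*(t'+1) + (2*(s'+1) + (t'+1)))/3 = s' + t' + 2 by omega,
            show (2*(2*(s'+1) + (t'+1)) - (s'+1 + 2*(t'+1)))/3 = s' + 1 by omega]
        conv_rhs => rw [show s' + t' + 2 = (s' + t' + 1) + 1 by omega, Nat.choose_succ_succ]
        push_cast
        conv_rhs => rw [Int.add_emod]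
        norm_num
    · -- unsolvable: both predecessors are unsolvable too
      rw [pvCf, if_neg hs, if_neg (show ¬(a = 0 ∧ b = 0) by omega)]
      have hT1 : (if 1 ≤ a ∧ 2 ≤ b then pvG (a-1) (b-2) else 0) = 0 := by
        by_cases g1 : 1 ≤ a ∧ 2 ≤ b
        · rw [if_pos g1, ih _ (by omega) _ _ rfl, pvCf, if_neg (by omega)]
        · rw [if_neg g1]
      have hT2 : (if 2 ≤ a ∧ 1 ≤ b then pvG (a-2) (b-1) else 0) = 0 := by
        by_cases g2 : 2 ≤ a ∧ 1 ≤ b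
        · rw [if_pos g2, ih _ (by omega) _ _ rfl, pvCf, if_neg (by omega)]
        · rw [if_neg g2]
      rw [hT1, hT2]
      norm_num

lemma pvChoose_loop (a b : Nat) :
    (PySem.List.pyRange 1 ((a:Int)+1) 1).foldl
      (fun c i => PySem.Int.floordiv (c * ((b:Int) + i)) i) 1
    = ((Nat.choose (a+b) a : Nat) : Int) := by
  induction a with
  | zero =>
    rw [show (((0:Nat)):Int) + 1 = 1 by norm_num,
        PySem.List.pyRange_one_eq_nil (le_refl 1)]
    simp
  | succ a ihc =>
    rw [show (((a+1:Nat)):Int) + 1 = (((a:Nat):Int) + 1) + 1 by push_cast; ring,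
        PySem.List.pyRange_one_succ_right (by omega : (1:Int) ≤ (a:Int) + 1),
        List.foldl_append]
    simp only [List.foldl_cons, List.foldl_nil]
    rw [ihc]
    have hkey : ((Nat.choose (a+b) a : Nat) : Int) * ((b:Int) + ((a:Int)+1))
        = ((Nat.choose (a+1+b) (a+1) : Nat) : Int) * ((a:Int)+1) := by
      have h := Nat.add_one_mul_choose_eq (a+b) a
      have hN : (a+b).choose a * (b + (a+1)) = (a+1+b).choose (a+1) * (a+1) := by
        rw [show a+1+b = a+b+1 by omega, show b + (a+1) = a+b+1 by omega,
            Nat.mul_comm ((a+b).choose a) (a+b+1), h]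
      exact_mod_cast hN
    rw [hkey, PySem.Int.floordiv_eq_ediv_of_pos (by omega),
        Int.mul_ediv_cancel _ (by omega)]

lemma pvAlt_eq_cf (x y : Nat) : solve_alt (x:Int) (y:Int) = pvCf x y := by
  simp only [solve_alt]
  have hmodc : PySem.Int.mod ((x:Int)+(y:Int)) 3 = (((x+y) % 3 : Nat) : Int) := by
    rw [show ((x:Int)+(y:Int)) = ((x+y : Nat):Int) by push_cast; ring,
        show (3:Int) = ((3:Nat):Int) by norm_num, PySem.Int.mod_natCast]
  have hfa : PySem.Int.floordiv (2*(y:Int) - (x:Int)) 3 = (2*(y:Int) - (x:Int)) / 3 :=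
    PySem.Int.floordiv_eq_ediv_of_pos (by norm_num)
  have hfb : PySem.Int.floordiv (2*(x:Int) - (y:Int)) 3 = (2*(x:Int) - (y:Int)) / 3 :=
    PySem.Int.floordiv_eq_ediv_of_pos (by norm_num)
  by_cases h3 : (x + y) % 3 = 0
  · have hmod0 : PySem.Int.mod ((x:Int)+(y:Int)) 3 = 0 := by
      rw [hmodc, h3]; norm_num
    rw [if_neg (show ¬(PySem.Int.mod ((x:Int)+(y:Int)) 3 ≠ 0) from fun hd => hd hmod0)]
    by_cases hab : x ≤ 2*y ∧ y ≤ 2*x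
    · have hca : (2*(y:Int) - (x:Int)) / 3 = (((2*y - x)/3 : Nat) : Int) := by omega
      have hcb : (2*(x:Int) - (y:Int)) / 3 = (((2*x - y)/3 : Nat) : Int) := by omega
      rw [hfa, hfb, hca, hcb,
          if_neg (show ¬((((2*y - x)/3 : Nat) : Int) < 0 ∨ (((2*x - y)/3 : Nat) : Int) < 0) by omega)]
      rw [pvChoose_loop, pvCf, if_pos (show (x+y) % 3 = 0 ∧ x ≤ 2*y ∧ y ≤ 2*x from ⟨h3, hab.1, hab.2⟩)]
      rw [show (2*y - x)/3 + (2*x - y)/3 = (x+y)/3 by omega,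
          PySem.Int.mod_eq_emod_of_pos (by norm_num)]
    · rw [hfa, hfb, if_pos (show (2*(y:Int) - (x:Int)) / 3 < 0 ∨ (2*(x:Int) - (y:Int)) / 3 < 0 by omega)]
      rw [pvCf, if_neg (show ¬((x+y) % 3 = 0 ∧ x ≤ 2*y ∧ y ≤ 2*x) by omega)]
  · have hmodne : PySem.Int.mod ((x:Int)+(y:Int)) 3 ≠ 0 := by
      rw [hmodc]
      exact_mod_cast fun hd => h3 (by exact_mod_cast hd)
    rw [if_pos hmodne, pvCf, if_neg (show ¬((x+y) % 3 = 0 ∧ x ≤ 2*y ∧ y ≤ 2*x) by omega)]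

-- ===== VERDICT (by name: the statement is the Claim_ definition above) =====
theorem solve_spec : Claim_equal_solve := by
  intro x y _ hpre
  obtain ⟨hx, hy⟩ := hpre
  unfold Spec_solve
  obtain ⟨m, rfl⟩ : ∃ m : Nat, x = (m:Int) := ⟨x.toNat, (Int.toNat_of_nonneg hx).symm⟩
  obtain ⟨n, rfl⟩ : ∃ n : Nat, y = (n:Int) := ⟨y.toNat, (Int.toNat_of_nonneg hy).symm⟩
  rw [pvSolve_eq_g, pvAlt_eq_cf, pvG_eq_cf (m+n) m n rfl]
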